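-- pv_equiv track=rewrite | github.com/BeomSeokYu/Algorithm | Programmers/Basic/369게임.py | solution
-- ===== SOURCE A (Python) =====
-- def solution(order):
--     answer = 0
--     while order != 0:
--         t = order % 10
--         order = order // 10
--         if t in [3, 6, 9]:
--             answer += 1
--     return answer
-- ===== SOURCE B (Python) =====
-- def solution(order):
--     return sum(1 for c in str(order) if c in '369')
-- ===== Notes on version B (the rewrite author's own statement) =====
-- stated objective: idiomatic
-- what changed: B counts the characters '3','6','9' in str(order) instead of A's while-loop peeling digits with modulus and floor division; Pre_ excludes negative order, where A loops forever.
import Mathlib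
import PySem

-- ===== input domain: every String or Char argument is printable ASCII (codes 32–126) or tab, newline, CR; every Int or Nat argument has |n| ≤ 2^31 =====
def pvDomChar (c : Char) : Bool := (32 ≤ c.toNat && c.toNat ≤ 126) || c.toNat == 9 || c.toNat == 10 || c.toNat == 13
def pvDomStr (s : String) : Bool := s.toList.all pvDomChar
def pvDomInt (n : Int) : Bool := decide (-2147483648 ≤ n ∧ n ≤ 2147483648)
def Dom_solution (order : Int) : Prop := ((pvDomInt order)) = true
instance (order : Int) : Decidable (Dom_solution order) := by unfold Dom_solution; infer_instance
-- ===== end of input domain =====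

-- B counts the '3'/'6'/'9' characters of str(order) instead of A's digit-peeling arithmetic loop (idiomatic decomposition, same cost).

-- ===== PORT A =====
-- A's while-loop, made total with fuel; for order ≥ 0 the loop runs at most order.natAbs + 1 times.
def pvLoopA : Nat → Int → Int → Int
  | 0, _, answer => answer
  | fuel + 1, order, answer =>
    if order = 0 then answer
    else
      let t := PySem.Int.mod order 10
      let order' := PySem.Int.floordiv order 10
      let answer' := if t ∈ ([3, 6, 9] : List Int) then answer + 1 else answer
      pvLoopA fuel order' answer'

def solution (order : Int) : Int := pvLoopA (order.natAbs + 1) order 0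

-- ===== PORT B =====
def solution_alt (order : Int) : Int :=
  ((PySem.Int.toStr order).toList.countP (fun c => decide (c ∈ (['3', '6', '9'] : List Char))) : Nat)

-- ===== PRECONDITION & SPEC =====
-- Pre_ excludes negative order: there A's while-loop never terminates (floor division stalls before reaching zero), so A returns on exactly the nonnegative inputs.
def Pre_solution (order : Int) : Prop := 0 ≤ order
instance (order : Int) : Decidable (Pre_solution order) := by unfold Pre_solution; infer_instance
def pvWitness_solution : Int := (369)

def Spec_solution (order : Int) (out : Int) : Prop := out = solution_alt order
instance (order : Int) (out : Int) : Decidable (Spec_solution order out) := by unfold Spec_solution; infer_instance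

-- ===== CLAIM (what is proved, stated in full; the proofs are below) =====
def Claim_equal_solution : Prop := ∀ (order : Int), Dom_solution order → Pre_solution order → Spec_solution order (solution order)

-- ===== LEMMAS AND PROOFS =====

-- the common digit-count function both ports are reduced to
def pvH (n : Nat) : Nat :=
  (if n % 10 = 3 ∨ n % 10 = 6 ∨ n % 10 = 9 then 1 else 0) +
    (if h : n / 10 = 0 then 0 else pvH (n / 10))
termination_by n
decreasing_by
  exact Nat.div_lt_self (Nat.pos_of_ne_zero (by intro h0; subst h0; simp at h)) (by norm_num)

def pvCnt (ds : List Char) : Nat :=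
  ds.countP (fun c => decide (c ∈ (['3', '6', '9'] : List Char)))

lemma pvH_zero : pvH 0 = 0 := by rw [pvH]; norm_num

lemma pvH_eq (n : Nat) :
    pvH n = (if n % 10 = 3 ∨ n % 10 = 6 ∨ n % 10 = 9 then 1 else 0) + pvH (n / 10) := by
  conv_lhs => rw [pvH]
  congr 1
  split_ifs with hq
  · rw [hq, pvH_zero]
  · rfl

lemma pvCnt_digit (m : Nat) (hm : m < 10) (ds : List Char) :
    pvCnt (Nat.digitChar m :: ds) = (if m = 3 ∨ m = 6 ∨ m = 9 then 1 else 0) + pvCnt ds := by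
  interval_cases m <;> simp [pvCnt, Nat.digitChar] <;> omega

lemma pvCore_succ (fuel n : Nat) (ds : List Char) :
    Nat.toDigitsCore 10 (fuel + 1) n ds =
      if n / 10 = 0 then Nat.digitChar (n % 10) :: ds
      else Nat.toDigitsCore 10 fuel (n / 10) (Nat.digitChar (n % 10) :: ds) := rfl

lemma pvLoopA_succ (fuel : Nat) (order ans : Int) :
    pvLoopA (fuel + 1) order ans =
      if order = 0 then ans
      else pvLoopA fuel (PySem.Int.floordiv order 10)
        (if PySem.Int.mod order 10 ∈ ([3, 6, 9] : List Int) then ans + 1 else ans) := rfl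

lemma pvCore_cnt : ∀ (fuel n : Nat) (ds : List Char), n ≤ fuel →
    pvCnt (Nat.toDigitsCore 10 (fuel + 1) n ds) = pvH n + pvCnt ds := by
  intro fuel
  induction fuel with
  | zero =>
    intro n ds hn
    have hn0 : n = 0 := Nat.le_zero.mp hn
    subst hn0
    rw [pvCore_succ, if_pos (by norm_num)]
    rw [pvCnt_digit 0 (by norm_num), pvH_zero]
    norm_num
  | succ f ih =>
    intro n ds hn
    rw [pvCore_succ, pvH_eq]
    by_cases hq : n / 10 = 0
    · rw [if_pos hq, pvCnt_digit (n % 10) (Nat.mod_lt n (by omega)), hq, pvH_zero]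
      omega
    · have h0 : 0 < n := by
        rcases Nat.eq_zero_or_pos n with h | h
        · exfalso; exact hq (by simp [h])
        · exact h
      have hle : n / 10 ≤ f := by
        have := Nat.div_lt_self h0 (by norm_num : 1 < 10)
        omega
      rw [if_neg hq, ih (n / 10) _ hle, pvCnt_digit (n % 10) (Nat.mod_lt n (by omega))]
      omega

lemma pvLoopA_cnt : ∀ (fuel n : Nat) (ans : Int), n ≤ fuel →
    pvLoopA (fuel + 1) (n : Int) ans = ans + (pvH n : Int) := by
  intro fuel
  induction fuel with
  | zero =>
    intro n ans hn
    have hn0 : n = 0 := Nat.le_zero.mp hn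
    subst hn0
    rw [pvLoopA_succ, if_pos (by norm_num), pvH_zero]
    norm_num
  | succ f ih =>
    intro n ans hn
    by_cases h0 : n = 0
    · subst h0
      rw [pvLoopA_succ, if_pos (by norm_num), pvH_zero]
      norm_num
    · have hmod : PySem.Int.mod (n : Int) 10 = ((n % 10 : Nat) : Int) := by
        rw [PySem.Int.mod_eq_emod_of_pos (by norm_num)]
        exact_mod_cast (Int.natCast_mod n 10).symm
      have hdiv : PySem.Int.floordiv (n : Int) 10 = ((n / 10 : Nat) : Int) := by
        rw [PySem.Int.floordiv_eq_ediv_of_pos (by norm_num)]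
        exact_mod_cast (Int.natCast_div n 10).symm
      have hle : n / 10 ≤ f := by
        have := Nat.div_lt_self (Nat.pos_of_ne_zero h0) (by norm_num : 1 < 10)
        omega
      rw [pvLoopA_succ, if_neg (by exact_mod_cast h0), hmod, hdiv, ih (n / 10) _ hle, pvH_eq n]
      have hmemb : (((n % 10 : Nat) : Int) ∈ ([3, 6, 9] : List Int))
          ↔ (n % 10 = 3 ∨ n % 10 = 6 ∨ n % 10 = 9) := by
        simp only [List.mem_cons, List.not_mem_nil, or_false]
        omega
      by_cases hd : n % 10 = 3 ∨ n % 10 = 6 ∨ n % 10 = 9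
      · rw [if_pos (hmemb.mpr hd), if_pos hd]; push_cast; ring
      · rw [if_neg (fun hc => hd (hmemb.mp hc)), if_neg hd]; push_cast; ring

-- ===== VERDICT (by name: the statement is the Claim_ definition above) =====
theorem solution_spec : Claim_equal_solution := by
  intro order _ hpre
  unfold Spec_solution solution solution_alt
  obtain ⟨n, rfl⟩ := Int.eq_ofNat_of_zero_le hpre
  rw [show (Int.natAbs (n : Int)) = n by simp]
  rw [pvLoopA_cnt n n 0 le_rfl]
  rw [PySem.Int.toList_toStr]
  have hch : PySem.Int.toChars (n : Int) = Nat.toDigitsCore 10 (n + 1) n [] := by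
    simp [PySem.Int.toChars, Nat.toDigits]
  rw [hch]
  rw [show (List.countP (fun c => decide (c ∈ (['3', '6', '9'] : List Char)))
      (Nat.toDigitsCore 10 (n + 1) n []) : Nat) = pvCnt (Nat.toDigitsCore 10 (n + 1) n []) from rfl]
  rw [pvCore_cnt n n [] le_rfl]
  simp [pvCnt]
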